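-- pv_equiv track=rewrite | github.com/moudemans/GFuzz | EvalutionData/main.py | get_steps_x_y
-- ===== SOURCE A (Python) =====
-- def get_steps_x_y(all_x_data, all_y_data):
--     all_step_x = []
--     all_step_y = []
--     for m in range(0, len(all_x_data)):
--         method_step_x = []
--         method_step_y = []
--         prev_val = 0
--         for i in range(0, len(all_y_data[m])):
--             if all_y_data[m][i] != prev_val:
--                 prev_val = all_y_data[m][i]
--                 method_step_x.append(all_x_data[m][i])
--                 method_step_y.append(all_y_data[m][i])
--             if i >= len(all_y_data[m]) - 1:
--                 method_step_x.append(all_x_data[m][i])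
--                 method_step_y.append(all_y_data[m][i])
--         all_step_x.append(method_step_x)
--         all_step_y.append(method_step_y)
--     return all_step_x, all_step_y
-- ===== SOURCE B (Python) =====
-- def get_steps_x_y(all_x_data, all_y_data):
--     all_step_x = []
--     all_step_y = []
--     for m in range(len(all_x_data)):
--         x = all_x_data[m]
--         y = all_y_data[m]
--         n = len(y)
--         # partition y into maximal constant runs; record each run's start index
--         starts = []
--         i = 0
--         while i < n:
--             starts.append(i)
--             j = i
--             while j + 1 < n and y[j + 1] == y[j]:
--                 j += 1
--             i = j + 1
--         # a run opens a step unless it is the initial run continuing the 0 baseline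
--         if starts and y[0] == 0:
--             change = starts[1:]
--         else:
--             change = starts
--         sx = [x[k] for k in change]
--         sy = [y[k] for k in change]
--         if n:
--             sx.append(x[n - 1])
--             sy.append(y[n - 1])
--         all_step_x.append(sx)
--         all_step_y.append(sy)
--     return all_step_x, all_step_y
-- ===== Notes on version B (the rewrite author's own statement) =====
-- stated objective: alternative
-- what changed: Replaces A's single fused loop with a mutable prev_val and in-loop last-index test by a run-length partition per series: nested while loops split y into maximal constant runs, the run start indices (minus an initial 0-valued run) are the step points, gathered afterwards with the final point appended once.
import Mathlib
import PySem

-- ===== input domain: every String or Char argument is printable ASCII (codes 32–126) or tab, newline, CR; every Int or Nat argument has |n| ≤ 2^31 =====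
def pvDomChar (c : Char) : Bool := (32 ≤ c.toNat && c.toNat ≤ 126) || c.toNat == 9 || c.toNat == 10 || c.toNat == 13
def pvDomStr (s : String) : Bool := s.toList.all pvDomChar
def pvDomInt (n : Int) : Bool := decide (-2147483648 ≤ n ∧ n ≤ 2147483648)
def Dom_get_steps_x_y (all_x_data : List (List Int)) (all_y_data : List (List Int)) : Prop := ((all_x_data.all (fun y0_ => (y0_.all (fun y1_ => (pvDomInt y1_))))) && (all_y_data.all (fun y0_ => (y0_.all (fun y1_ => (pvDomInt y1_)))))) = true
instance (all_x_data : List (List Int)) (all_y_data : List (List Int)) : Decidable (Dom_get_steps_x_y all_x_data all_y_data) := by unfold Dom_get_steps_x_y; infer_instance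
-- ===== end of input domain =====

-- B replaces A's fused stateful loop by a run-length partition per series (maximal constant
-- runs, step points = run starts minus an initial 0-valued run, final point appended once);
-- equal return values on Pre_ (Pre_ marks where the Pythons raise IndexError).
-- ===== PORT A =====
-- one fused loop per series: mutable prev_val, conditional append, and the
-- "last element always appended" test inside the same loop (A's structure)
def pvStepA (xm ym : List Int) (st : List Int × List Int × Int) (i : Int) : List Int × List Int × Int :=
  let yi := PySem.List.pyGetD ym i 0
  let st1 := if yi ≠ st.2.2 then (st.1 ++ [PySem.List.pyGetD xm i 0], st.2.1 ++ [yi], yi) else st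
  if ((ym.length : Int) - 1 ≤ i) then (st1.1 ++ [PySem.List.pyGetD xm i 0], st1.2.1 ++ [yi], st1.2.2) else st1

def pvInnerA (xm ym : List Int) : List Int × List Int × Int :=
  (PySem.List.pyRange 0 (ym.length : Int)).foldl (pvStepA xm ym) ([], [], 0)

def get_steps_x_y (all_x_data : List (List Int)) (all_y_data : List (List Int)) : List (List Int) × List (List Int) :=
  (PySem.List.pyRange 0 (all_x_data.length : Int)).foldl
    (fun acc m =>
      let inner := pvInnerA (PySem.List.pyGetD all_x_data m []) (PySem.List.pyGetD all_y_data m [])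
      (acc.1 ++ [inner.1], acc.2 ++ [inner.2.1]))
    ([], [])

-- ===== PORT B =====
-- inner while loop of B: advance j while y[j+1] == y[j] (end index of the run starting at j)
def pvRunEnd (ym : List Int) (j : Nat) : Nat :=
  if j + 1 < ym.length ∧ ym.getD (j + 1) 0 = ym.getD j 0 then pvRunEnd ym (j + 1) else j
termination_by ym.length - j

lemma pvRunEnd_ge (ym : List Int) (i : Nat) : i ≤ pvRunEnd ym i := by
  unfold pvRunEnd
  split
  · next h => have := pvRunEnd_ge ym (i + 1); omega
  · exact le_refl i
termination_by ym.length - i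
decreasing_by omega

-- outer while loop of B: collect the start index of every maximal constant run
def pvStarts (ym : List Int) (i : Nat) : List Nat :=
  if h : i < ym.length then i :: pvStarts ym (pvRunEnd ym i + 1) else []
termination_by ym.length - i
decreasing_by
  have := pvRunEnd_ge ym i
  omega

def pvSeriesB (xm ym : List Int) : List Int × List Int :=
  let n := ym.length
  let starts := pvStarts ym 0
  let change := if starts ≠ [] ∧ ym.getD 0 0 = 0 then starts.tail else starts
  let sx := change.map (fun k => xm.getD k 0)
  let sy := change.map (fun k => ym.getD k 0)
  if n ≠ 0 then (sx ++ [xm.getD (n - 1) 0], sy ++ [ym.getD (n - 1) 0]) else (sx, sy)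

def get_steps_x_y_alt (all_x_data : List (List Int)) (all_y_data : List (List Int)) : List (List Int) × List (List Int) :=
  (PySem.List.pyRange 0 (all_x_data.length : Int)).foldl
    (fun acc m =>
      let p := pvSeriesB (PySem.List.pyGetD all_x_data m []) (PySem.List.pyGetD all_y_data m [])
      (acc.1 ++ [p.1], acc.2 ++ [p.2]))
    ([], [])

-- ===== PRECONDITION & SPEC =====
-- Pre_ excludes exactly the inputs on which Python A raises IndexError: a series index m with no
-- y-series, or a non-empty y-series longer than its x-series (the last index is always read).
-- B raises there too.
def Pre_get_steps_x_y (all_x_data : List (List Int)) (all_y_data : List (List Int)) : Prop :=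
  ∀ m ∈ List.range all_x_data.length,
    m < all_y_data.length ∧
      ((all_y_data.getD m []) ≠ [] → (all_y_data.getD m []).length ≤ (all_x_data.getD m []).length)
instance (all_x_data : List (List Int)) (all_y_data : List (List Int)) : Decidable (Pre_get_steps_x_y all_x_data all_y_data) := by unfold Pre_get_steps_x_y; infer_instance

def pvWitness_get_steps_x_y : List (List Int) × List (List Int) :=
  ([[1, 2, 3], [4]], [[0, 5, 5], [7]])

def Spec_get_steps_x_y (all_x_data : List (List Int)) (all_y_data : List (List Int)) (out : List (List Int) × List (List Int)) : Prop := out = get_steps_x_y_alt all_x_data all_y_data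
instance (all_x_data : List (List Int)) (all_y_data : List (List Int)) (out : List (List Int) × List (List Int)) : Decidable (Spec_get_steps_x_y all_x_data all_y_data out) := by unfold Spec_get_steps_x_y; infer_instance

-- ===== CLAIM (what is proved, stated in full; the proofs are below) =====
def Claim_equal_get_steps_x_y : Prop := ∀ (all_x_data : List (List Int)) (all_y_data : List (List Int)), Dom_get_steps_x_y all_x_data all_y_data → Pre_get_steps_x_y all_x_data all_y_data → Spec_get_steps_x_y all_x_data all_y_data (get_steps_x_y all_x_data all_y_data)

-- ===== LEMMAS AND PROOFS =====

-- change indices of the first k positions of ym: value differs from its 0-padded predecessor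
def pvChIdx (ym : List Int) (k : Nat) : List Nat :=
  (List.range k).filter (fun i => decide (ym.getD i 0 ≠ ((0 : Int) :: ym).getD i 0))

-- loop invariant for A's fused loop before the last index
lemma pvInnerA_inv (xm ym : List Int) (k : Nat) (hk : k < ym.length) :
    (((List.range k).map (fun (i : Nat) => (i : Int)))).foldl (pvStepA xm ym) ([], [], 0)
      = ((pvChIdx ym k).map (fun i => xm.getD i 0),
         (pvChIdx ym k).map (fun i => ym.getD i 0),
         ((0 : Int) :: ym).getD k 0) := by
  induction k with
  | zero => simp [pvChIdx]
  | succ k ih =>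
    have hk' : k < ym.length := Nat.lt_of_succ_lt hk
    rw [List.range_succ, List.map_append, List.foldl_append, ih hk']
    simp only [List.map_cons, List.map_nil, List.foldl_cons, List.foldl_nil]
    have hne : ¬ ((ym.length : Int) - 1 ≤ (k : Int)) := by omega
    have hch : pvChIdx ym (k + 1)
        = pvChIdx ym k ++ if ym.getD k 0 ≠ ((0 : Int) :: ym).getD k 0 then [k] else [] := by
      simp [pvChIdx, List.range_succ, List.filter_append]
      split_ifs with h <;> simp [h]
    simp [pvStepA, PySem.List.pyGetD_natCast, hne, hch]
    split_ifs with hc <;> simp [hc]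

lemma pvRunEnd_lt (ym : List Int) (i : Nat) (h : i < ym.length) : pvRunEnd ym i < ym.length := by
  unfold pvRunEnd
  split
  · next hc => exact pvRunEnd_lt ym (i + 1) hc.1
  · exact h
termination_by ym.length - i
decreasing_by omega

lemma pvRunEnd_run (ym : List Int) (i : Nat) :
    ∀ k, i < k → k ≤ pvRunEnd ym i → ym.getD k 0 = ym.getD (k - 1) 0 := by
  unfold pvRunEnd
  split
  · next hc =>
    intro k hk1 hk2
    by_cases hk : k = i + 1
    · subst hk; simpa using hc.2
    · exact pvRunEnd_run ym (i + 1) k (by omega) hk2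
  · intro k hk1 hk2; omega
termination_by ym.length - i
decreasing_by omega

lemma pvRunEnd_stop (ym : List Int) (i : Nat) (h : pvRunEnd ym i + 1 < ym.length) :
    ym.getD (pvRunEnd ym i + 1) 0 ≠ ym.getD (pvRunEnd ym i) 0 := by
  by_cases hc : i + 1 < ym.length ∧ ym.getD (i + 1) 0 = ym.getD i 0
  · have he : pvRunEnd ym i = pvRunEnd ym (i + 1) := by rw [pvRunEnd, if_pos hc]
    rw [he] at h ⊢
    exact pvRunEnd_stop ym (i + 1) h
  · have he : pvRunEnd ym i = i := by rw [pvRunEnd, if_neg hc]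
    rw [he] at h ⊢
    intro heq
    exact hc ⟨h, heq⟩
termination_by ym.length - i
decreasing_by omega

-- extract the first satisfying index of a filter over range
lemma pvFilterRangeCons (n e : Nat) (p : Nat → Bool) (he : e < n) (hpe : p e = true)
    (hlow : ∀ k, k < e → p k = false) :
    (List.range n).filter p = e :: (List.range n).filter (fun k => decide (e < k) && p k) := by
  have hn : n = (e + 1) + (n - e - 1) := by omega
  rw [hn, List.range_add, List.filter_append, List.filter_append]
  have h1 : (List.range (e + 1)).filter p = [e] := by
    rw [List.range_succ, List.filter_append]
    have : (List.range e).filter p = [] := by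
      rw [List.filter_eq_nil_iff]
      intro a ha
      simp only [List.mem_range] at ha
      simp [hlow a ha]
    simp [this, hpe]
  have h2 : (List.range (e + 1)).filter (fun k => decide (e < k) && p k) = [] := by
    rw [List.filter_eq_nil_iff]
    intro a ha
    simp only [List.mem_range] at ha
    simp; omega
  have h3 : ((List.range (n - e - 1)).map (fun x => e + 1 + x)).filter p
      = ((List.range (n - e - 1)).map (fun x => e + 1 + x)).filter (fun k => decide (e < k) && p k) := by
    apply List.filter_congr
    intro a ha
    simp only [List.mem_map] at ha
    obtain ⟨x, _, rfl⟩ := ha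
    simp [show e < e + 1 + x by omega]
  rw [h1, h2, h3]
  simp

-- the run starts collected from i are i plus every later index whose value differs from its predecessor
lemma pvStarts_eq (ym : List Int) (i : Nat) (h : i < ym.length) :
    pvStarts ym i = i :: (List.range ym.length).filter
      (fun k => decide (i < k) && decide (ym.getD k 0 ≠ ym.getD (k - 1) 0)) := by
  rw [pvStarts, dif_pos h]
  have hge := pvRunEnd_ge ym i
  have hlt := pvRunEnd_lt ym i h
  by_cases h2 : pvRunEnd ym i + 1 < ym.length
  · rw [pvStarts_eq ym (pvRunEnd ym i + 1) h2]
    rw [pvFilterRangeCons ym.length (pvRunEnd ym i + 1)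
        (fun k => decide (i < k) && decide (ym.getD k 0 ≠ ym.getD (k - 1) 0)) h2
        (by
          have hst := pvRunEnd_stop ym i h2
          simp only [Bool.and_eq_true, decide_eq_true_eq]
          exact ⟨by omega, by simpa using hst⟩)
        (by
          intro k hk
          by_cases hik : i < k
          · have heq := pvRunEnd_run ym i k hik (by omega)
            have hd : decide (ym.getD k 0 ≠ ym.getD (k - 1) 0) = false :=
              decide_eq_false_iff_not.mpr (fun hne => hne heq)
            show (decide (i < k) && decide (ym.getD k 0 ≠ ym.getD (k - 1) 0)) = false
            rw [hd, Bool.and_false]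
          · show (decide (i < k) && decide (ym.getD k 0 ≠ ym.getD (k - 1) 0)) = false
            rw [decide_eq_false_iff_not.mpr hik, Bool.false_and])]
    congr 1
    congr 1
    apply List.filter_congr
    intro a _
    by_cases ha : pvRunEnd ym i + 1 < a
    · rw [decide_eq_true ha, decide_eq_true (show i < a by omega)]
      simp
    · rw [decide_eq_false_iff_not.mpr ha]
      simp
  · have hnil : pvStarts ym (pvRunEnd ym i + 1) = [] := by rw [pvStarts, dif_neg h2]
    rw [hnil]
    have : (List.range ym.length).filter
        (fun k => decide (i < k) && decide (ym.getD k 0 ≠ ym.getD (k - 1) 0)) = [] := by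
      rw [List.filter_eq_nil_iff]
      intro a ha
      simp only [List.mem_range] at ha
      simp only [Bool.and_eq_true, decide_eq_true_eq]
      by_cases hik : i < a
      · have heq := pvRunEnd_run ym i a hik (by omega)
        exact fun hc => hc.2 heq
      · exact fun hc => hik hc.1
    rw [this]
termination_by ym.length - i
decreasing_by omega

-- per-series agreement: A's fused loop produces exactly B's run-partition gather
lemma pvInner_eq (xm ym : List Int) :
    ((pvInnerA xm ym).1, (pvInnerA xm ym).2.1) = pvSeriesB xm ym := by
  rcases eq_or_ne ym [] with h | h
  · subst h
    have hs : pvStarts ([] : List Int) 0 = [] := by rw [pvStarts]; simp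
    simp [pvInnerA, pvSeriesB, PySem.List.pyRange, hs]
  · have hn : 1 ≤ ym.length := by have := List.length_pos_iff.mpr h; omega
    have hs := pvStarts_eq ym 0 (by omega)
    -- B's step points are exactly A's change indices
    have hchange : (if pvStarts ym 0 ≠ [] ∧ ym.getD 0 0 = 0 then (pvStarts ym 0).tail
        else pvStarts ym 0) = pvChIdx ym ym.length := by
      by_cases h0 : ym.getD 0 0 = 0
      · rw [if_pos ⟨by rw [hs]; simp, h0⟩, hs]
        simp only [List.tail_cons]
        unfold pvChIdx
        apply List.filter_congr
        intro a _
        cases a with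
        | zero => simpa using h0
        | succ j => simp
      · rw [if_neg (by tauto), hs]
        unfold pvChIdx
        conv_rhs => rw [pvFilterRangeCons ym.length 0 _ (by omega)
          (decide_eq_true (by simpa using h0)) (by intro k hk; omega)]
        congr 1
        apply List.filter_congr
        intro a _
        cases a with
        | zero => simp
        | succ j => simp
    have hB : pvSeriesB xm ym
        = ((pvChIdx ym ym.length).map (fun i => xm.getD i 0) ++ [xm.getD (ym.length - 1) 0],
           (pvChIdx ym ym.length).map (fun i => ym.getD i 0) ++ [ym.getD (ym.length - 1) 0]) := by
      unfold pvSeriesB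
      simp only [hchange, if_pos (show ym.length ≠ 0 by omega)]
    -- A side: peel the last loop iteration
    have hrange : List.range ym.length = List.range (ym.length - 1) ++ [ym.length - 1] := by
      conv_lhs => rw [show ym.length = (ym.length - 1) + 1 by omega]
      exact List.range_succ
    have hch : pvChIdx ym ym.length
        = pvChIdx ym (ym.length - 1)
          ++ if ym.getD (ym.length - 1) 0 ≠ ((0 : Int) :: ym).getD (ym.length - 1) 0
             then [ym.length - 1] else [] := by
      conv_lhs => rw [show ym.length = (ym.length - 1) + 1 by omega]
      simp [pvChIdx, List.range_succ, List.filter_append]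
      split_ifs with hcc <;> simp [hcc]
    have hA : pvInnerA xm ym
        = pvStepA xm ym
            ((pvChIdx ym (ym.length - 1)).map (fun i => xm.getD i 0),
             (pvChIdx ym (ym.length - 1)).map (fun i => ym.getD i 0),
             ((0 : Int) :: ym).getD (ym.length - 1) 0)
            ((ym.length - 1 : Nat) : Int) := by
      unfold pvInnerA
      rw [PySem.List.pyRange_zero_natCast, hrange, List.map_append, List.foldl_append,
        pvInnerA_inv xm ym (ym.length - 1) (by omega)]
      simp
    rw [hA, hB]
    have hle : (ym.length : Int) - 1 ≤ ((ym.length - 1 : Nat) : Int) := by omega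
    simp [pvStepA, PySem.List.pyGetD_natCast, hch, List.map_append, hle]
    split_ifs with hc <;> simp [hc]

-- ===== VERDICT (by name: the statement is the Claim_ definition above) =====
theorem get_steps_x_y_spec : Claim_equal_get_steps_x_y := by
  intro X Y _ _
  unfold Spec_get_steps_x_y get_steps_x_y get_steps_x_y_alt
  apply PySem.List.foldl_congr_mem
  intro acc m _
  have h := pvInner_eq (PySem.List.pyGetD X m []) (PySem.List.pyGetD Y m [])
  have h1 := congrArg Prod.fst h
  have h2 := congrArg Prod.snd h
  simp only at h1 h2
  simp [h1, h2]
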